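-- pv_equiv track=rewrite | github.com/kcentric/deep_nlp_on_sf_literature | main files/sentences_of_entities.py | binary_search_word
-- ===== SOURCE A (Python) =====
-- def binary_search_word(sentence, sorted_word_list):
--     """A binary search that takes in a sorted list of words or terms, along with a sentence, and sees
--     if any of the words in the wordlist is present in the sentence.
--
--     USUAL time complexity: O(log n) IF "sentence" is a small constant (<20 words for ex) long. As intended.
--     Max POTENTIAL time complexity: O(n * log n) if sentence is a huge list itself."""
--     # Split the sentence into words
--     words_in_sentence = sentence.split()
--
--     # Perform binary search for each word in the sentence
--     for word in words_in_sentence: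
--         # Binary search implementation
--         low, high = 0, len(sorted_word_list) - 1
--
--         while low <= high:
--             mid = (low + high) // 2
--             mid_word = sorted_word_list[mid]
--
--             if mid_word == word:
--                 return True  # Word found in the list
--             elif mid_word < word:
--                 low = mid + 1
--             else:
--                 high = mid - 1
--
--     return False  # None of the words found in the list
-- ===== SOURCE B (Python) =====
-- def binary_search_word(sentence, sorted_word_list):
--     """Slice-based divide-and-conquer: recurse on sublists instead of index
--     bounds.  The pivot (len(sub) - 1) // 2 of a slice [lo:hi+1] is the same
--     element A probes with (lo + hi) // 2, so the comparison sequence (and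
--     hence the result, even on unsorted lists) is identical."""
--     def search(word, sub):
--         if not sub:
--             return False
--         m = (len(sub) - 1) // 2
--         pivot = sub[m]
--         if pivot == word:
--             return True
--         if pivot < word:
--             return search(word, sub[m + 1:])
--         return search(word, sub[:m])
--
--     return any(search(word, sorted_word_list) for word in sentence.split())
-- ===== Notes on version B (the rewrite author's own statement) =====
-- stated objective: alternative
-- what changed: A's index-based while-loop over (low, high) bounds is replaced by a slice-based divide-and-conquer: a recursive helper on sublists with pivot (len(sub)-1)//2, which probes exactly the same elements as A's (lo+hi)//2, driven by any() over the split words.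
import Mathlib
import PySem

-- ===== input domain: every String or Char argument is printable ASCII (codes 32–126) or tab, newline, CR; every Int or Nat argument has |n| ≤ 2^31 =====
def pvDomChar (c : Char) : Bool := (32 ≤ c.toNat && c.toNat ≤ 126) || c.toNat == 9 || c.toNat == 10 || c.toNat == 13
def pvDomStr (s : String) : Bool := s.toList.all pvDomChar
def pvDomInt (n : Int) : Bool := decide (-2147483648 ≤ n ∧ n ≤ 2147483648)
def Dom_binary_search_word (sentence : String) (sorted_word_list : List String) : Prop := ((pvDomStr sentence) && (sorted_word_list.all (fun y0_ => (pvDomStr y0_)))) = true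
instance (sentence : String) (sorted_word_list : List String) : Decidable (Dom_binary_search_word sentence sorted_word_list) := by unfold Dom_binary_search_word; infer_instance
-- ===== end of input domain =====

-- B replaces A's index-bound while-loop by a slice-based divide-and-conquer on sublists;
-- the pivot (len-1)//2 of the slice is the element A probes with (lo+hi)//2, so results agree.

-- ===== PORT A =====
-- A's inner while-loop: state (low, high), same branch order. `fuel` only makes the recursion
-- structural (the interval shrinks strictly each step, so `length + 1` steps always suffice and
-- the fuel-out branch is unreachable); the `none` branch of pyGet? is likewise unreachable
-- (0 ≤ low ≤ mid ≤ high ≤ len - 1 throughout), kept total with `false`.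
def pvAWhile (sorted_word_list : List String) (word : String) : Nat → Int → Int → Bool
  | 0, _, _ => false
  | fuel + 1, low, high =>
    if low ≤ high then
      match PySem.List.pyGet? sorted_word_list (PySem.Int.floordiv (low + high) 2) with
      | none => false
      | some mid_word =>
        if mid_word == word then true
        else if mid_word < word then
          pvAWhile sorted_word_list word fuel (PySem.Int.floordiv (low + high) 2 + 1) high
        else
          pvAWhile sorted_word_list word fuel low (PySem.Int.floordiv (low + high) 2 - 1)
    else false

-- A's for-loop over the sentence's words, early return on True.
def pvAFor (sorted_word_list : List String) : List String → Bool
  | [] => false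
  | word :: rest =>
    if pvAWhile sorted_word_list word (sorted_word_list.length + 1) 0 ((sorted_word_list.length : Int) - 1) then true
    else pvAFor sorted_word_list rest

def binary_search_word (sentence : String) (sorted_word_list : List String) : Bool :=
  pvAFor sorted_word_list (PySem.Str.split₀ sentence)

-- ===== PORT B =====
-- The pivot index (len(sub)-1)//2 of a nonempty list is in range (cited by the port).
theorem pvMidLt (sub : List String) (h : sub ≠ []) : (sub.length - 1) / 2 < sub.length := by
  have : 0 < sub.length := List.length_pos_iff.mpr h
  omega

-- B's recursive helper `search(word, sub)` on sublists; Python's `sub[m+1:]`/`sub[:m]` are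
-- List.drop/List.take (the clamped drop/take PySem.List.slice is defined as, at these
-- nonnegative in-range bounds), and `sub[m]` with 0 ≤ m < len(sub) is the total getElem
-- (in-range by pvMidLt).
def pvBSearch (word : String) (sub : List String) : Bool :=
  if hsub : sub = [] then false
  else if sub[(sub.length - 1) / 2]'(pvMidLt sub hsub) == word then true
  else if sub[(sub.length - 1) / 2]'(pvMidLt sub hsub) < word then
    pvBSearch word (sub.drop ((sub.length - 1) / 2 + 1))
  else
    pvBSearch word (sub.take ((sub.length - 1) / 2))
termination_by sub.length
decreasing_by
  · have := pvMidLt sub hsub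
    simp only [List.length_drop]; omega
  · have := pvMidLt sub hsub
    simp only [List.length_take]; omega

def binary_search_word_alt (sentence : String) (sorted_word_list : List String) : Bool :=
  (PySem.Str.split₀ sentence).any fun word => pvBSearch word sorted_word_list

-- ===== PRECONDITION & SPEC =====
def Spec_binary_search_word (sentence : String) (sorted_word_list : List String) (out : Bool) : Prop := out = binary_search_word_alt sentence sorted_word_list
instance (sentence : String) (sorted_word_list : List String) (out : Bool) : Decidable (Spec_binary_search_word sentence sorted_word_list out) := by unfold Spec_binary_search_word; infer_instance

-- ===== CLAIM (what is proved, stated in full; the proofs are below) =====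
def Claim_equal_binary_search_word : Prop := ∀ (sentence : String) (sorted_word_list : List String), Dom_binary_search_word sentence sorted_word_list → Spec_binary_search_word sentence sorted_word_list (binary_search_word sentence sorted_word_list)

-- ===== LEMMAS AND PROOFS =====

-- A's loop on bounds (lo, hi) equals B's recursion on the slice wl[lo .. hi]:
-- the interval length hi - lo + 1 is the slice length, A's probe (lo+hi)//2 is the
-- slice's (len-1)/2, and the two recursive calls correspond to drop/take of the slice.
theorem pvAWhile_eq_pvBSearch (wl : List String) (word : String) :
    ∀ (fuel : Nat) (lo hi : Int), 0 ≤ lo → hi < wl.length → hi - lo + 1 < fuel →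
      pvAWhile wl word fuel lo hi
        = pvBSearch word ((wl.drop lo.toNat).take (hi + 1 - lo).toNat) := by
  intro fuel
  induction fuel with
  | zero =>
    intro lo hi _ _ hf
    have hnil : ((wl.drop lo.toNat).take (hi + 1 - lo).toNat) = ([] : List String) := by
      have : (hi + 1 - lo).toNat = 0 := by omega
      rw [this, List.take_zero]
    rw [hnil, pvAWhile, pvBSearch]
    rfl
  | succ fuel ih =>
    intro lo hi hlo hhi hf
    set sub := (wl.drop lo.toNat).take (hi + 1 - lo).toNat with hsubdef
    have hsublen : sub.length = (hi + 1 - lo).toNat := by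
      simp only [hsubdef, List.length_take, List.length_drop]
      omega
    rw [pvAWhile]
    by_cases h : lo ≤ hi
    · rw [if_pos h]
      have hne : sub ≠ [] := by
        intro he
        rw [he] at hsublen
        simp at hsublen
        omega
      set m : Nat := (sub.length - 1) / 2 with hmdef
      have hmlt : m < sub.length := pvMidLt sub hne
      have hmid : PySem.Int.floordiv (lo + hi) 2 = lo + (m : Int) := by
        rw [PySem.Int.floordiv_eq_ediv_of_pos (by norm_num : (0:Int) < 2)]
        omega
      have hmid_nonneg : (0:Int) ≤ lo + (m : Int) := by omega
      have hmid_lt : lo + (m : Int) < wl.length := by omega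
      have hsubget : sub[m]'hmlt = wl[(lo + (m:Int)).toNat]'(by omega) := by
        simp only [hsubdef]
        rw [List.getElem_take, List.getElem_drop]
        congr 1
        omega
      have hget : PySem.List.pyGet? wl (lo + (m:Int)) = some (sub[m]'hmlt) := by
        rw [PySem.List.pyGet?_of_nonneg wl hmid_nonneg, hsubget]
        rw [List.getElem?_eq_getElem (by omega)]
      rw [hmid, hget]
      dsimp only
      rw [pvBSearch, dif_neg hne]
      simp only [← hmdef]
      by_cases heq : (sub[m]'hmlt == word) = true
      · rw [if_pos heq, if_pos heq]
      · rw [if_neg heq, if_neg heq]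
        by_cases hlt : sub[m]'hmlt < word
        · rw [if_pos hlt, if_pos hlt]
          have hdrop : sub.drop (m + 1)
              = (wl.drop (lo + (m:Int) + 1).toNat).take (hi + 1 - (lo + (m:Int) + 1)).toNat := by
            rw [hsubdef, List.drop_take, List.drop_drop]
            congr 2 <;> omega
          rw [hdrop]
          exact ih (lo + (m:Int) + 1) hi (by omega) hhi (by omega)
        · rw [if_neg hlt, if_neg hlt]
          have htake : sub.take m
              = (wl.drop lo.toNat).take ((lo + (m:Int) - 1) + 1 - lo).toNat := by
            rw [hsubdef, List.take_take]
            congr 1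
            omega
          rw [htake]
          exact ih lo (lo + (m:Int) - 1) hlo (by omega) (by omega)
    · rw [if_neg h]
      have hsub : sub = [] := List.length_eq_zero_iff.mp (by omega)
      rw [pvBSearch, dif_pos hsub]

-- The early-return for-loop is `any` of the per-word search on the whole list.
theorem pvAFor_eq_any (wl : List String) (ws : List String) :
    pvAFor wl ws = ws.any (fun w => pvBSearch w wl) := by
  induction ws with
  | nil => rfl
  | cons w rest ih =>
    have hw : pvAWhile wl w (wl.length + 1) 0 ((wl.length : Int) - 1) = pvBSearch w wl := by
      rw [pvAWhile_eq_pvBSearch wl w (wl.length + 1) 0 ((wl.length : Int) - 1)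
        (le_refl 0) (by omega) (by omega)]
      congr 1
      simp
    simp [pvAFor, hw, ih, List.any_cons]

-- ===== VERDICT (by name: the statement is the Claim_ definition above) =====
theorem binary_search_word_spec : Claim_equal_binary_search_word := by
  intro sentence wl _
  unfold Spec_binary_search_word binary_search_word binary_search_word_alt
  exact pvAFor_eq_any wl (PySem.Str.split₀ sentence)
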